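-- pv_equiv track=rewrite | github.com/FranciscoRamirezRuiz/Trabajo-2-analisis-de-algoritmos | dp_solver.py | escape_tridimensional
-- ===== SOURCE A (Python) =====
-- def escape_tridimensional(grid, n):
--     """
--     Resuelve el problema usando una tabla tridimensional de programación dinámica.
--
--     Args:
--     grid (list): La cuadrícula del refugio.
--     n (int): Tamaño de la cuadrícula.
--
--     Returns:
--     int: El máximo número de cápsulas que se pueden recoger.
--     """
--     dp = [[[-1 for _ in range(2 * n)] for _ in range(n)] for _ in range(n)]
--
--     def f(x, y, t):
--         if x < 0 or x >= n or y < 0 or y >= n or grid[x][y] == 'B':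
--             return -1  # Si estamos fuera del rango o en una bomba, no es válido
--         if t == 2 * n - 1:
--             return 0  # Casos base: hemos llegado al límite de pasos
--         if dp[x][y][t] != -1:
--             return dp[x][y][t]  # Devuelve el valor memoizado
--
--         # Evaluamos las cuatro posibles direcciones
--         max_capsulas = max(f(x + 1, y, t + 1), f(x - 1, y, t + 1),
--                            f(x, y + 1, t + 1), f(x, y - 1, t + 1))
--
--         # Si hay una cápsula en esta celda, sumamos 1
--         if grid[x][y] == 'R':
--             max_capsulas += 1
--
--         dp[x][y][t] = max_capsulas
--         return max_capsulas
--
--     return f(0, 0, 0)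
-- ===== SOURCE B (Python) =====
-- def escape_tridimensional(grid, n):
--     """Iterative bottom-up DP over time layers instead of memoized recursion."""
--     if n <= 0:
--         return -1
--     if grid[0][0] == 'B':
--         return -1
--
--     def neighbor(layer, a, b):
--         if 0 <= a < n and 0 <= b < n and grid[a][b] != 'B':
--             return layer[a][b]
--         return -1
--
--     # layer for t = 2n-1: every valid cell scores 0, bombs are -1
--     cur = [[-1 if grid[x][y] == 'B' else 0 for y in range(n)] for x in range(n)]
--     for _ in range(2 * n - 1):
--         nxt = cur
--         cur = [[-1 if grid[x][y] == 'B'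
--                 else (max(neighbor(nxt, x + 1, y), neighbor(nxt, x - 1, y),
--                           neighbor(nxt, x, y + 1), neighbor(nxt, x, y - 1))
--                       + (1 if grid[x][y] == 'R' else 0))
--                 for y in range(n)] for x in range(n)]
--     return cur[0][0]
-- ===== Notes on version B (the rewrite author's own statement) =====
-- stated objective: alternative
-- what changed: Replaces A's memoized top-down recursion with a mutable 3D table by an iterative bottom-up DP that sweeps 2n-1 time layers, each layer an n x n grid built from the previous one.
-- outside the precondition, e.g. on escape_tridimensional([['R', 'B'], ['B', 'B']], 4): A returns 0, B raises IndexError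
import Mathlib
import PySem

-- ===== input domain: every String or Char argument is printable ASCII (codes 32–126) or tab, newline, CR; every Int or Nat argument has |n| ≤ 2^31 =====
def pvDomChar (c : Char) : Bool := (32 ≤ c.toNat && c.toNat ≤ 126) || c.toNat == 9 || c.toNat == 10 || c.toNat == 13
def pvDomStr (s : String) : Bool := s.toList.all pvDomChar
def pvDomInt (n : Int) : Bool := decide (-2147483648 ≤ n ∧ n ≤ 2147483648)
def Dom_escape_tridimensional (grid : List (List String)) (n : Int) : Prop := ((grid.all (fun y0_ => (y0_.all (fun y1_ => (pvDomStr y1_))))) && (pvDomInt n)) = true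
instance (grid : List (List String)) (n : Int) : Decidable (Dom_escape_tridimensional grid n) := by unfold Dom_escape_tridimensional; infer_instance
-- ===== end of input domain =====

-- B replaces A's memoized recursion over (x,y,t) by an iterative bottom-up DP over time layers; same O(n^3) cost, different decomposition.


-- ===== PORT A =====
-- grid[x][y]; only ever evaluated with 0 ≤ x < n, 0 ≤ y < n, where Pre_ guarantees both
-- indices are in range, so the `getD` defaults are never used inside Pre_ (exact there).
def pvCellA (grid : List (List String)) (x y : Int) : String :=
  (PySem.List.pyGet? ((PySem.List.pyGet? grid x).getD []) y).getD ""

-- A's inner f, with the mutable 3D memo table dp threaded through as state.  The Python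
-- table is n×n×2n filled with -1 and only ever read/written at 0 ≤ x,y < n, 0 ≤ t < 2n-1,
-- so a Dict with default -1 models it exactly.  `fuel` only makes the recursion total:
-- recursion happens only while t < 2n-1, so depth ≤ 2n and the 0 case is never reached
-- from the entry call.
def pvFA (grid : List (List String)) (n : Int) (fuel : Nat) (x y t : Int)
    (dp : PySem.Dict (Int × Int × Int) Int) : Int × PySem.Dict (Int × Int × Int) Int :=
  if x < 0 ∨ n ≤ x ∨ y < 0 ∨ n ≤ y ∨ pvCellA grid x y = "B" then (-1, dp)
  else if t = 2 * n - 1 then (0, dp)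
  else if dp.getD (x, y, t) (-1) ≠ -1 then (dp.getD (x, y, t) (-1), dp)
  else
    match fuel with
    | 0 => (-1, dp)
    | fuel + 1 =>
      let r1 := pvFA grid n fuel (x + 1) y (t + 1) dp
      let r2 := pvFA grid n fuel (x - 1) y (t + 1) r1.2
      let r3 := pvFA grid n fuel x (y + 1) (t + 1) r2.2
      let r4 := pvFA grid n fuel x (y - 1) (t + 1) r3.2
      let m := max (max (max r1.1 r2.1) r3.1) r4.1
      let m := if pvCellA grid x y = "R" then m + 1 else m
      (m, r4.2.insert (x, y, t) m)

def escape_tridimensional (grid : List (List String)) (n : Int) : Int :=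
  (pvFA grid n (2 * n).toNat 0 0 0 PySem.Dict.empty).1

-- ===== PORT B =====
-- layer[a][b]; only evaluated at 0 ≤ a,b < n where the layer is an n×n table
def pvGetvB (layer : List (List Int)) (a b : Int) : Int :=
  (PySem.List.pyGet? ((PySem.List.pyGet? layer a).getD []) b).getD (-1)

def pvValidB (grid : List (List String)) (n a b : Int) : Bool :=
  decide (0 ≤ a) && decide (a < n) && decide (0 ≤ b) && decide (b < n) && !(pvCellA grid a b == "B")

def pvNeighborB (grid : List (List String)) (n : Int) (layer : List (List Int)) (a b : Int) : Int :=
  if pvValidB grid n a b then pvGetvB layer a b else -1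

def pvStepB (grid : List (List String)) (n : Int) (nxt : List (List Int)) : List (List Int) :=
  (List.range n.toNat).map fun (x : Nat) => (List.range n.toNat).map fun (y : Nat) =>
    if pvCellA grid (x : Int) (y : Int) = "B" then -1
    else
      max (max (max (pvNeighborB grid n nxt ((x : Int) + 1) y) (pvNeighborB grid n nxt ((x : Int) - 1) y))
               (pvNeighborB grid n nxt x ((y : Int) + 1))) (pvNeighborB grid n nxt x ((y : Int) - 1))
      + (if pvCellA grid (x : Int) (y : Int) = "R" then 1 else 0)

def pvBaseB (grid : List (List String)) (n : Int) : List (List Int) :=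
  (List.range n.toNat).map fun (x : Nat) => (List.range n.toNat).map fun (y : Nat) =>
    if pvCellA grid (x : Int) (y : Int) = "B" then -1 else 0

def escape_tridimensional_alt (grid : List (List String)) (n : Int) : Int :=
  if n ≤ 0 then -1
  else if pvCellA grid 0 0 = "B" then -1
  else pvGetvB ((pvStepB grid n)^[(2 * n - 1).toNat] (pvBaseB grid n)) 0 0

-- ===== PRECONDITION & SPEC =====
-- Pre_ asks for a full n×n prefix of the grid.  The Python A short-circuits cell access
-- behind bombs, so on some undersized grids whose reachable part is walled off it still
-- returns a value while B (which builds the whole n×n table) raises IndexError; those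
-- shape-degenerate inputs are excluded here.
def Pre_escape_tridimensional (grid : List (List String)) (n : Int) : Prop :=
  0 < n → (n ≤ (grid.length : Int) ∧ ∀ row ∈ grid.take n.toNat, n ≤ (row.length : Int))
instance (grid : List (List String)) (n : Int) : Decidable (Pre_escape_tridimensional grid n) := by
  unfold Pre_escape_tridimensional; infer_instance

def pvWitness_escape_tridimensional : List (List String) × Int := ([["R", "."], [".", "R"]], 2)

def Spec_escape_tridimensional (grid : List (List String)) (n : Int) (out : Int) : Prop := out = escape_tridimensional_alt grid n
instance (grid : List (List String)) (n : Int) (out : Int) : Decidable (Spec_escape_tridimensional grid n out) := by unfold Spec_escape_tridimensional; infer_instance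

-- ===== CLAIM (what is proved, stated in full; the proofs are below) =====
def Claim_equal_escape_tridimensional : Prop := ∀ (grid : List (List String)) (n : Int), Dom_escape_tridimensional grid n → Pre_escape_tridimensional grid n → Spec_escape_tridimensional grid n (escape_tridimensional grid n)

-- ===== LEMMAS AND PROOFS =====

-- the mathematical recurrence both programs compute: value of a cell with k steps left
def pvVal (grid : List (List String)) (n : Int) : Nat → Int → Int → Int
  | 0, x, y => if x < 0 ∨ n ≤ x ∨ y < 0 ∨ n ≤ y ∨ pvCellA grid x y = "B" then -1 else 0
  | k + 1, x, y =>
    if x < 0 ∨ n ≤ x ∨ y < 0 ∨ n ≤ y ∨ pvCellA grid x y = "B" then -1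
    else
      let m := max (max (max (pvVal grid n k (x + 1) y) (pvVal grid n k (x - 1) y))
                        (pvVal grid n k x (y + 1))) (pvVal grid n k x (y - 1))
      if pvCellA grid x y = "R" then m + 1 else m

lemma pvVal_invalid (grid : List (List String)) (n : Int) (k : Nat) (x y : Int)
    (h : x < 0 ∨ n ≤ x ∨ y < 0 ∨ n ≤ y ∨ pvCellA grid x y = "B") :
    pvVal grid n k x y = -1 := by
  cases k <;> simp [pvVal, h]

-- memo-table invariant: every non-(-1) entry is the recurrence value of its key
def pvGood (grid : List (List String)) (n : Int) (dp : PySem.Dict (Int × Int × Int) Int) : Prop :=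
  ∀ x y t : Int, dp.getD (x, y, t) (-1) ≠ -1 →
    dp.getD (x, y, t) (-1) = pvVal grid n (2 * n - 1 - t).toNat x y

lemma pvFA_correct (grid : List (List String)) (n : Int) :
    ∀ (fuel : Nat) (x y t : Int) (dp : PySem.Dict (Int × Int × Int) Int),
      pvGood grid n dp → 0 ≤ t → t ≤ 2 * n - 1 → (2 * n - 1 - t).toNat ≤ fuel →
      (pvFA grid n fuel x y t dp).1 = pvVal grid n (2 * n - 1 - t).toNat x y ∧
      pvGood grid n (pvFA grid n fuel x y t dp).2 := by
  intro fuel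
  induction fuel with
  | zero =>
    intro x y t dp hg ht0 ht1 hf
    have hteq : t = 2 * n - 1 := by omega
    have hk : (2 * n - 1 - t).toNat = 0 := by omega
    rw [pvFA, hk]
    by_cases h1 : x < 0 ∨ n ≤ x ∨ y < 0 ∨ n ≤ y ∨ pvCellA grid x y = "B"
    · rw [if_pos h1]
      exact ⟨by rw [pvVal_invalid grid n 0 x y h1], hg⟩
    · rw [if_neg h1, if_pos hteq]
      exact ⟨by simp [pvVal, h1], hg⟩
  | succ fuel ih =>
    intro x y t dp hg ht0 ht1 hf
    rw [pvFA]
    by_cases h1 : x < 0 ∨ n ≤ x ∨ y < 0 ∨ n ≤ y ∨ pvCellA grid x y = "B"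
    · rw [if_pos h1]
      exact ⟨by rw [pvVal_invalid grid n _ x y h1], hg⟩
    · rw [if_neg h1]
      by_cases h2 : t = 2 * n - 1
      · rw [if_pos h2]
        have hk : (2 * n - 1 - t).toNat = 0 := by omega
        rw [hk]
        exact ⟨by simp [pvVal, h1], hg⟩
      · rw [if_neg h2]
        have hk : (2 * n - 1 - t).toNat = (2 * n - 1 - (t + 1)).toNat + 1 := by omega
        by_cases h3 : dp.getD (x, y, t) (-1) ≠ -1
        · rw [if_pos h3]
          exact ⟨hg x y t h3, hg⟩
        · rw [if_neg h3]
          obtain ⟨e1, g1⟩ := ih (x + 1) y (t + 1) dp hg (by omega) (by omega) (by omega)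
          obtain ⟨e2, g2⟩ := ih (x - 1) y (t + 1) _ g1 (by omega) (by omega) (by omega)
          obtain ⟨e3, g3⟩ := ih x (y + 1) (t + 1) _ g2 (by omega) (by omega) (by omega)
          obtain ⟨e4, g4⟩ := ih x (y - 1) (t + 1) _ g3 (by omega) (by omega) (by omega)
          simp only []
          rw [hk]
          set k := (2 * n - 1 - (t + 1)).toNat with hkdef
          have hm : (if pvCellA grid x y = "R" then
                max (max (max (pvFA grid n fuel (x+1) y (t+1) dp).1
                  (pvFA grid n fuel (x-1) y (t+1) (pvFA grid n fuel (x+1) y (t+1) dp).2).1)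
                  (pvFA grid n fuel x (y+1) (t+1) (pvFA grid n fuel (x-1) y (t+1) (pvFA grid n fuel (x+1) y (t+1) dp).2).2).1)
                  (pvFA grid n fuel x (y-1) (t+1) (pvFA grid n fuel x (y+1) (t+1) (pvFA grid n fuel (x-1) y (t+1) (pvFA grid n fuel (x+1) y (t+1) dp).2).2).2).1 + 1
              else
                max (max (max (pvFA grid n fuel (x+1) y (t+1) dp).1
                  (pvFA grid n fuel (x-1) y (t+1) (pvFA grid n fuel (x+1) y (t+1) dp).2).1)
                  (pvFA grid n fuel x (y+1) (t+1) (pvFA grid n fuel (x-1) y (t+1) (pvFA grid n fuel (x+1) y (t+1) dp).2).2).1)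
                  (pvFA grid n fuel x (y-1) (t+1) (pvFA grid n fuel x (y+1) (t+1) (pvFA grid n fuel (x-1) y (t+1) (pvFA grid n fuel (x+1) y (t+1) dp).2).2).2).1)
              = pvVal grid n (k + 1) x y := by
            rw [e1, e2, e3, e4, pvVal, if_neg h1]
          constructor
          · exact hm
          · intro a b s hne
            rw [PySem.Dict.getD_insert] at hne ⊢
            by_cases hkey : (a, b, s) = (x, y, t)
            · rw [if_pos hkey] at hne ⊢
              have ha : a = x := congrArg Prod.fst hkey
              have hb : b = y := congrArg (fun p => p.2.1) hkey
              have hs : s = t := congrArg (fun p => p.2.2) hkey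
              subst ha; subst hb; subst hs
              rw [hk]
              exact hm
            · rw [if_neg hkey] at hne ⊢
              exact g4 a b s hne

lemma pvGetvB_table (g : Nat → Nat → Int) (m x y : Nat) (hx : x < m) (hy : y < m) :
    pvGetvB ((List.range m).map fun a => (List.range m).map fun b => g a b) (x : Int) (y : Int) = g x y := by
  simp [pvGetvB, hx, hy]

lemma pvGetvB_baseB (grid : List (List String)) (n : Int) (x y : Nat)
    (hx : x < n.toNat) (hy : y < n.toNat) :
    pvGetvB (pvBaseB grid n) (x : Int) (y : Int) =
    if pvCellA grid (x : Int) (y : Int) = "B" then -1 else 0 := by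
  unfold pvBaseB; rw [pvGetvB_table _ _ _ _ hx hy]

lemma pvGetvB_stepB (grid : List (List String)) (n : Int) (nxt : List (List Int)) (x y : Nat)
    (hx : x < n.toNat) (hy : y < n.toNat) :
    pvGetvB (pvStepB grid n nxt) (x : Int) (y : Int) =
    if pvCellA grid (x : Int) (y : Int) = "B" then -1
    else
      max (max (max (pvNeighborB grid n nxt ((x : Int) + 1) y) (pvNeighborB grid n nxt ((x : Int) - 1) y))
               (pvNeighborB grid n nxt x ((y : Int) + 1))) (pvNeighborB grid n nxt x ((y : Int) - 1))
      + (if pvCellA grid (x : Int) (y : Int) = "R" then 1 else 0) := by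
  unfold pvStepB; rw [pvGetvB_table _ _ _ _ hx hy]

lemma pvLayerB (grid : List (List String)) (n : Int) (hn : 0 < n) :
    ∀ (k : Nat) (x y : Nat), x < n.toNat → y < n.toNat →
      pvGetvB ((pvStepB grid n)^[k] (pvBaseB grid n)) (x : Int) (y : Int) =
      pvVal grid n k (x : Int) (y : Int) := by
  intro k
  induction k with
  | zero =>
    intro x y hx hy
    rw [Function.iterate_zero_apply, pvGetvB_baseB grid n x y hx hy]
    have hxn : (x : Int) < n := by omega
    have hyn : (y : Int) < n := by omega
    by_cases hB : pvCellA grid (x : Int) (y : Int) = "B"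
    · simp [pvVal, hB]
    · have hnv : ¬((x:Int) < 0 ∨ n ≤ (x:Int) ∨ (y:Int) < 0 ∨ n ≤ (y:Int) ∨ pvCellA grid (x:Int) (y:Int) = "B") := by
        push Not; exact ⟨by omega, by omega, by omega, by omega, hB⟩
      simp only [pvVal, if_neg hnv, if_neg hB]
  | succ k ih =>
    intro x y hx hy
    rw [Function.iterate_succ_apply', pvGetvB_stepB grid n _ x y hx hy]
    have hxn : (x : Int) < n := by omega
    have hyn : (y : Int) < n := by omega
    have hnb : ∀ a b : Int, pvNeighborB grid n ((pvStepB grid n)^[k] (pvBaseB grid n)) a b = pvVal grid n k a b := by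
      intro a b
      unfold pvNeighborB
      by_cases hv : pvValidB grid n a b = true
      · rw [if_pos hv]
        simp only [pvValidB, Bool.and_eq_true, decide_eq_true_eq, Bool.not_eq_true',
          beq_eq_false_iff_ne] at hv
        obtain ⟨⟨⟨⟨ha0, han⟩, hb0⟩, hbn⟩, hB⟩ := hv
        have hea : ((a.toNat : Nat) : Int) = a := Int.toNat_of_nonneg ha0
        have heb : ((b.toNat : Nat) : Int) = b := Int.toNat_of_nonneg hb0
        rw [← hea, ← heb]
        exact ih a.toNat b.toNat (by omega) (by omega)
      · rw [if_neg hv]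
        rw [Bool.not_eq_true] at hv
        simp only [pvValidB, Bool.and_eq_false_iff, decide_eq_false_iff_not, Bool.not_eq_false',
          beq_iff_eq] at hv
        refine (pvVal_invalid grid n k a b ?_).symm
        rcases hv with ((((h|h)|h)|h)|h)
        · exact Or.inl (by omega)
        · exact Or.inr (Or.inl (by omega))
        · exact Or.inr (Or.inr (Or.inl (by omega)))
        · exact Or.inr (Or.inr (Or.inr (Or.inl (by omega))))
        · exact Or.inr (Or.inr (Or.inr (Or.inr h)))
    by_cases hB : pvCellA grid (x : Int) (y : Int) = "B"
    · simp [pvVal, hB]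
    · have hnv : ¬((x:Int) < 0 ∨ n ≤ (x:Int) ∨ (y:Int) < 0 ∨ n ≤ (y:Int) ∨ pvCellA grid (x:Int) (y:Int) = "B") := by
        push Not; exact ⟨by omega, by omega, by omega, by omega, hB⟩
      rw [if_neg hB]
      simp only [hnb]
      show _ = pvVal grid n (k+1) _ _
      rw [pvVal, if_neg hnv]
      by_cases hR : pvCellA grid (x : Int) (y : Int) = "R" <;> simp [hR]

-- ===== VERDICT (by name: the statement is the Claim_ definition above) =====
theorem escape_tridimensional_spec : Claim_equal_escape_tridimensional := by
  intro grid n _hdom hpre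
  unfold Spec_escape_tridimensional escape_tridimensional escape_tridimensional_alt
  by_cases hn : n ≤ 0
  · rw [if_pos hn, pvFA.eq_def, if_pos (Or.inr (Or.inl hn))]
  · rw [if_neg hn]
    have hn' : 0 < n := by omega
    have hgood : pvGood grid n PySem.Dict.empty := by
      intro a b s h
      simp [PySem.Dict.getD_empty] at h
    have hA := (pvFA_correct grid n (2 * n).toNat 0 0 0 PySem.Dict.empty hgood
      (by omega) (by omega) (by omega)).1
    rw [hA]
    by_cases hB : pvCellA grid 0 0 = "B"
    · rw [if_pos hB]
      rw [pvVal_invalid grid n _ 0 0 (Or.inr (Or.inr (Or.inr (Or.inr hB))))]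
    · rw [if_neg hB]
      have := pvLayerB grid n hn' (2 * n - 1).toNat 0 0 (by omega) (by omega)
      simp only [Nat.cast_zero] at this
      rw [this]
      congr 1
      omega
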